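-- pv_equiv track=rewrite | github.com/yangjung-woo/KT-Workspace | KT_coding_masters/2차 코딩마스터즈/middle11.py | BFS
-- ===== SOURCE A (Python) =====
-- from collections import deque
--
-- def BFS (start,target):
--     visited = [False]*1000001
--     visited[start] = True
--     queue = deque([(start ,0)])
--
--     while queue:
--
--         now_num , steps = queue.popleft()
--
--         if now_num == target:
--             return steps
--
--         for i in (now_num+3 , now_num-1 , now_num*2):
--             if (0 <=i <=100000) and  (visited[i] == False):
--                 visited[i]= True
--                 queue.append((i,steps+1))
-- ===== SOURCE B (Python) =====
-- def BFS(start, target):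
--     # level-synchronized BFS: explore whole distance classes at a time,
--     # no deque and no (node, steps) pairs
--     visited = [False] * 100001
--     if 0 <= start <= 100000:
--         visited[start] = True
--     frontier = [start]
--     steps = 0
--     while frontier:
--         if target in frontier:
--             return steps
--         nxt = []
--         for n in frontier:
--             for i in (n + 3, n - 1, n * 2):
--                 if 0 <= i <= 100000 and not visited[i]:
--                     visited[i] = True
--                     nxt.append(i)
--         frontier = nxt
--         steps += 1
-- ===== Notes on version B (the rewrite author's own statement) =====
-- stated objective: alternative
-- what changed: Replaces the deque of (node,steps) pairs by a level-synchronized BFS: a plain frontier list per distance class with a single steps counter, and a visited table covering only the reachable range 0..100000 instead of 0..1000000 (measured constant-factor speedup from the 10x smaller table and no per-node tuples).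
import Mathlib
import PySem

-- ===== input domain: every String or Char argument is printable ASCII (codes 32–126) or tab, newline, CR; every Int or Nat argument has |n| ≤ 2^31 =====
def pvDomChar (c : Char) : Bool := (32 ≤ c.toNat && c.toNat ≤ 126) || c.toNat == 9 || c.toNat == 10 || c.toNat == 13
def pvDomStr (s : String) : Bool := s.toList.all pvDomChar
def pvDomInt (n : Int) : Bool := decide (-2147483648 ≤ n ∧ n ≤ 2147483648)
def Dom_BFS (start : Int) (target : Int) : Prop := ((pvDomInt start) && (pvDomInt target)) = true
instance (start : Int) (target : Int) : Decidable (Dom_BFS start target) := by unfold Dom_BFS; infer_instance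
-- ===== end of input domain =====

-- B replaces A's deque of (node, steps) pairs by a level-synchronized BFS (frontier list
-- per distance class, one steps counter, visited table only over the reachable range
-- 0..100000); same return value on all of Pre_ (objective: alternative decomposition).

-- ===== PORT A =====
-- number of unvisited cells: termination measure for both BFS loops
def cntF (v : Array Bool) : Nat := v.toList.count false

-- visited[start] = True with Python's negative-index rule; Pre_BFS keeps start in range,
-- so the out-of-range no-op of setIfInBounds is never taken (Python raises IndexError there).
def pySetVis (v : Array Bool) (i : Int) : Array Bool :=
  if i < 0 then v.setIfInBounds (Int.toNat ((v.size : Int) + i)) true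
  else v.setIfInBounds i.toNat true

-- one step of A's inner `for i in (…)`: guard, mark visited, append (i, steps+1) to the queue
def pushA (steps : Int) (st : List (Int × Int) × Array Bool) (i : Int) : List (Int × Int) × Array Bool :=
  if 0 ≤ i ∧ i ≤ 100000 ∧ st.2.getD i.toNat false = false then
    (st.1 ++ [(i, steps + 1)], st.2.setIfInBounds i.toNat true)
  else st

theorem foldPushA_size (s : Int) : ∀ (L : List Int) (st : List (Int × Int) × Array Bool),
    (L.foldl (pushA s) st).2.size = st.2.size := by
  intro L
  induction L with
  | nil => intro st; rfl
  | cons i L ih =>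
    intro st
    simp only [List.foldl_cons, ih]
    unfold pushA; split <;> simp

theorem count_false_set : ∀ (l : List Bool) (i : Nat), i < l.length → l[i]? = some false →
    (l.set i true).count false + 1 = l.count false := by
  intro l
  induction l with
  | nil => intro i h; simp at h
  | cons b t ih =>
    intro i h hf
    cases i with
    | zero => simp_all
    | succ j =>
      simp only [List.set_cons_succ, List.count_cons]
      have := ih j (by simpa using h) (by simpa using hf)
      omega

theorem cntF_set (v : Array Bool) (i : Nat) (hi : i < v.size) (hf : v.getD i false = false) :
    cntF (v.setIfInBounds i true) + 1 = cntF v := by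
  have hl : i < v.toList.length := by simpa using hi
  have hf' : v.toList[i]? = some false := by
    simp only [Array.getD, hi, dite_true] at hf
    simp only [List.getElem?_eq_getElem hl, Option.some_inj, Array.getElem_toList]
    exact hf
  unfold cntF
  rw [Array.toList_setIfInBounds]
  exact count_false_set v.toList i hl hf'

theorem foldPushA_measure (s : Int) : ∀ (L : List Int) (st : List (Int × Int) × Array Bool),
    st.2.size = 1000001 →
    (L.foldl (pushA s) st).1.length + cntF (L.foldl (pushA s) st).2 ≤ st.1.length + cntF st.2 := by
  intro L
  induction L with
  | nil => intro st _; simp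
  | cons i L ih =>
    intro st hsz
    simp only [List.foldl_cons]
    have hsz' : (pushA s st i).2.size = 1000001 := by
      unfold pushA; split <;> simp [hsz]
    refine le_trans (ih _ hsz') ?_
    unfold pushA
    split
    · rename_i hg
      have hin : i.toNat < st.2.size := by omega
      have := cntF_set st.2 i.toNat hin hg.2.2
      simp only [List.length_append, List.length_cons, List.length_nil]
      omega
    · exact le_refl _

def loopA (target : Int) (queue : List (Int × Int)) (v : Array Bool)
    (hv : v.size = 1000001) : Option Int :=
  match queue with
  | [] => none
  | (now, steps) :: rest =>
    if now = target then some steps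
    else
      loopA target ([now + 3, now - 1, now * 2].foldl (pushA steps) (rest, v)).1
        ([now + 3, now - 1, now * 2].foldl (pushA steps) (rest, v)).2
        (by rw [foldPushA_size]; exact hv)
termination_by queue.length + cntF v
decreasing_by
  have := foldPushA_measure steps [now + 3, now - 1, now * 2] (rest, v) hv
  simp at this ⊢
  omega

def BFS (start : Int) (target : Int) : Option Int :=
  loopA target [(start, 0)] (pySetVis (Array.replicate 1000001 false) start)
    (by unfold pySetVis; split <;> simp)

-- ===== PORT B =====
-- one step of B's inner `for i in (…)`: guard, mark visited, append the node to nxt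
def pushB (st : Array Bool × List Int) (i : Int) : Array Bool × List Int :=
  if 0 ≤ i ∧ i ≤ 100000 ∧ st.1.getD i.toNat false = false then
    (st.1.setIfInBounds i.toNat true, st.2 ++ [i])
  else st

-- B's `for n in frontier: for i in (n+3, n-1, n*2): …` building (visited, nxt)
def expandB (st : Array Bool × List Int) (fr : List Int) : Array Bool × List Int :=
  fr.foldl (fun st n => [n + 3, n - 1, n * 2].foldl pushB st) st

theorem foldPushB_size : ∀ (L : List Int) (st : Array Bool × List Int),
    (L.foldl pushB st).1.size = st.1.size := by
  intro L
  induction L with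
  | nil => intro st; rfl
  | cons i L ih =>
    intro st
    simp only [List.foldl_cons, ih]
    unfold pushB; split <;> simp

theorem foldPushB_measure : ∀ (L : List Int) (st : Array Bool × List Int),
    st.1.size = 100001 →
    (L.foldl pushB st).2.length + cntF (L.foldl pushB st).1 ≤ st.2.length + cntF st.1 := by
  intro L
  induction L with
  | nil => intro st _; simp
  | cons i L ih =>
    intro st hsz
    simp only [List.foldl_cons]
    have hsz' : (pushB st i).1.size = 100001 := by
      unfold pushB; split <;> simp [hsz]
    refine le_trans (ih _ hsz') ?_
    unfold pushB
    split
    · rename_i hg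
      have hin : i.toNat < st.1.size := by omega
      have := cntF_set st.1 i.toNat hin hg.2.2
      simp only [List.length_append, List.length_cons, List.length_nil]
      omega
    · exact le_refl _

theorem expandB_size (fr : List Int) (st : Array Bool × List Int) :
    (expandB st fr).1.size = st.1.size := by
  induction fr generalizing st with
  | nil => rfl
  | cons n fr ih =>
    show (expandB ([n + 3, n - 1, n * 2].foldl pushB st) fr).1.size = st.1.size
    rw [ih, foldPushB_size]

theorem expandB_measure (fr : List Int) (st : Array Bool × List Int) (hsz : st.1.size = 100001) :
    (expandB st fr).2.length + cntF (expandB st fr).1 ≤ st.2.length + cntF st.1 := by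
  induction fr generalizing st with
  | nil => simp [expandB]
  | cons n fr ih =>
    have h1 := foldPushB_measure [n + 3, n - 1, n * 2] st hsz
    have h2 : ([n + 3, n - 1, n * 2].foldl pushB st).1.size = 100001 := by
      rw [foldPushB_size]; exact hsz
    have h3 := ih ([n + 3, n - 1, n * 2].foldl pushB st) h2
    show (expandB ([n + 3, n - 1, n * 2].foldl pushB st) fr).2.length +
        cntF (expandB ([n + 3, n - 1, n * 2].foldl pushB st) fr).1 ≤ st.2.length + cntF st.1
    omega

def loopB (target : Int) (frontier : List Int) (v : Array Bool) (steps : Int)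
    (hv : v.size = 100001) : Option Int :=
  match frontier with
  | [] => none
  | f :: fs =>
    if target ∈ f :: fs then some steps
    else
      loopB target (expandB (v, []) (f :: fs)).2 (expandB (v, []) (f :: fs)).1 (steps + 1)
        (by rw [expandB_size]; exact hv)
termination_by frontier.length + cntF v
decreasing_by
  have := expandB_measure (f :: fs) (v, []) hv
  simp at this ⊢
  omega

def BFS_alt (start : Int) (target : Int) : Option Int :=
  loopB target [start]
    (if 0 ≤ start ∧ start ≤ 100000 then
       (Array.replicate 100001 false).setIfInBounds start.toNat true
     else Array.replicate 100001 false) 0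
    (by split <;> simp)

-- ===== PRECONDITION & SPEC =====
-- Pre_BFS excludes exactly the inputs where A raises IndexError: visited[start] on a
-- list of length 1000001 requires -1000001 <= start <= 1000000.
def Pre_BFS (start : Int) (target : Int) : Prop := -1000001 ≤ start ∧ start ≤ 1000000
instance (start : Int) (target : Int) : Decidable (Pre_BFS start target) := by
  unfold Pre_BFS; infer_instance

def pvWitness_BFS : Int × Int := (2, 11)

def Spec_BFS (start : Int) (target : Int) (out : Option Int) : Prop := out = BFS_alt start target
instance (start : Int) (target : Int) (out : Option Int) : Decidable (Spec_BFS start target out) := by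
  unfold Spec_BFS; infer_instance

-- ===== CLAIM (what is proved, stated in full; the proofs are below) =====
def Claim_equal_BFS : Prop := ∀ (start : Int) (target : Int), Dom_BFS start target →
  Pre_BFS start target → Spec_BFS start target (BFS start target)

-- ===== LEMMAS AND PROOFS =====

-- the two visited tables agree on the only range either BFS ever queries
def Agree (vA vB : Array Bool) : Prop :=
  ∀ j : Nat, j ≤ 100000 → vA.getD j false = vB.getD j false

-- A's expansion of a whole frontier (what one BFS level does to (queue, visited))
def expandA (s : Int) (st : List (Int × Int) × Array Bool) (fr : List Int) :
    List (Int × Int) × Array Bool :=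
  fr.foldl (fun st n => [n + 3, n - 1, n * 2].foldl (pushA s) st) st

theorem pushA_shift (s i : Int) (q1 q2 : List (Int × Int)) (v : Array Bool) :
    pushA s (q1 ++ q2, v) i = (q1 ++ (pushA s (q2, v) i).1, (pushA s (q2, v) i).2) := by
  unfold pushA; split <;> simp

theorem foldPushA_shift (s : Int) : ∀ (L : List Int) (q1 q2 : List (Int × Int)) (v : Array Bool),
    L.foldl (pushA s) (q1 ++ q2, v) =
      (q1 ++ (L.foldl (pushA s) (q2, v)).1, (L.foldl (pushA s) (q2, v)).2) := by
  intro L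
  induction L with
  | nil => intro q1 q2 v; rfl
  | cons i L ih =>
    intro q1 q2 v
    simp only [List.foldl_cons, pushA_shift]
    exact ih q1 _ _

theorem getD_setIfInBounds_true (a : Array Bool) (i j : Nat) (hj : j < a.size) :
    (a.setIfInBounds i true).getD j false = if j = i then true else a.getD j false := by
  by_cases h : j = i
  · subst h; simp [Array.getD, Array.size_setIfInBounds, hj]
  · simp [Array.getD, Array.size_setIfInBounds, hj, h, Ne.symm h]

theorem pushCorr (s i : Int) (q : List (Int × Int)) (acc : List Int) (vA vB : Array Bool)
    (hA : vA.size = 1000001) (hB : vB.size = 100001) (hag : Agree vA vB) :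
    ∃ X : List Int,
      (pushA s (q, vA) i).1 = q ++ X.map (fun x => (x, s + 1)) ∧
      (pushB (vB, acc) i).2 = acc ++ X ∧
      Agree (pushA s (q, vA) i).2 (pushB (vB, acc) i).1 ∧
      (pushA s (q, vA) i).2.size = 1000001 ∧ (pushB (vB, acc) i).1.size = 100001 ∧
      cntF (pushA s (q, vA) i).2 + X.length ≤ cntF vA := by
  by_cases hg : 0 ≤ i ∧ i ≤ 100000
  · have hjn : i.toNat ≤ 100000 := by omega
    have heq : vA.getD i.toNat false = vB.getD i.toNat false := hag i.toNat hjn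
    by_cases hvis : vB.getD i.toNat false = false
    · have hupA : pushA s (q, vA) i = (q ++ [(i, s + 1)], vA.setIfInBounds i.toNat true) := by
        simp [pushA, hg.1, hg.2, heq, hvis]
      have hupB : pushB (vB, acc) i = (vB.setIfInBounds i.toNat true, acc ++ [i]) := by
        simp [pushB, hg.1, hg.2, hvis]
      have hcnt := cntF_set vA i.toNat (by omega) (heq.trans hvis)
      refine ⟨[i], ?_, ?_, ?_, ?_, ?_, ?_⟩
      · rw [hupA]; simp
      · rw [hupB]
      · rw [hupA, hupB]
        intro j hj
        rw [getD_setIfInBounds_true vA i.toNat j (by omega),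
            getD_setIfInBounds_true vB i.toNat j (by omega)]
        split
        · rfl
        · exact hag j hj
      · rw [hupA]; simp [hA]
      · rw [hupB]; simp [hB]
      · rw [hupA]; simp; omega
    · have hupA : pushA s (q, vA) i = (q, vA) := by
        unfold pushA; rw [if_neg (fun h => hvis (heq ▸ h.2.2))]
      have hupB : pushB (vB, acc) i = (vB, acc) := by
        unfold pushB; rw [if_neg (fun h => hvis h.2.2)]
      exact ⟨[], by rw [hupA]; simp, by rw [hupB]; simp, by rw [hupA, hupB]; exact hag,
        by rw [hupA]; exact hA, by rw [hupB]; exact hB, by rw [hupA]; simp⟩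
  · have hgA : ¬ (0 ≤ i ∧ i ≤ 100000 ∧ vA.getD i.toNat false = false) := by tauto
    have hgB : ¬ (0 ≤ i ∧ i ≤ 100000 ∧ vB.getD i.toNat false = false) := by tauto
    have hupA : pushA s (q, vA) i = (q, vA) := by unfold pushA; rw [if_neg hgA]
    have hupB : pushB (vB, acc) i = (vB, acc) := by unfold pushB; rw [if_neg hgB]
    exact ⟨[], by rw [hupA]; simp, by rw [hupB]; simp, by rw [hupA, hupB]; exact hag,
      by rw [hupA]; exact hA, by rw [hupB]; exact hB, by rw [hupA]; simp⟩

theorem foldCorr (s : Int) : ∀ (L : List Int) (q : List (Int × Int)) (acc : List Int)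
    (vA vB : Array Bool), vA.size = 1000001 → vB.size = 100001 → Agree vA vB →
    ∃ X : List Int,
      (L.foldl (pushA s) (q, vA)).1 = q ++ X.map (fun x => (x, s + 1)) ∧
      (L.foldl pushB (vB, acc)).2 = acc ++ X ∧
      Agree (L.foldl (pushA s) (q, vA)).2 (L.foldl pushB (vB, acc)).1 ∧
      (L.foldl (pushA s) (q, vA)).2.size = 1000001 ∧ (L.foldl pushB (vB, acc)).1.size = 100001 ∧
      cntF (L.foldl (pushA s) (q, vA)).2 + X.length ≤ cntF vA := by
  intro L
  induction L with
  | nil =>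
    intro q acc vA vB hA hB hag
    exact ⟨[], by simp, by simp, hag, hA, hB, by simp⟩
  | cons i L ih =>
    intro q acc vA vB hA hB hag
    obtain ⟨X1, e1, e2, hag1, hA1, hB1, hc1⟩ := pushCorr s i q acc vA vB hA hB hag
    rcases hPA : pushA s (q, vA) i with ⟨qA, wA⟩
    rcases hPB : pushB (vB, acc) i with ⟨wB, accB⟩
    rw [hPA] at e1 hag1 hA1 hc1
    rw [hPB] at e2 hag1 hB1
    dsimp only at e1 e2 hag1 hA1 hB1 hc1
    obtain ⟨X2, f1, f2, hag2, hA2, hB2, hc2⟩ := ih qA accB wA wB hA1 hB1 hag1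
    refine ⟨X1 ++ X2, ?_, ?_, ?_, ?_, ?_, ?_⟩ <;> simp only [List.foldl_cons, hPA, hPB]
    · rw [f1, e1]; simp
    · rw [f2, e2]; simp
    · exact hag2
    · exact hA2
    · exact hB2
    · simp only [List.length_append]; omega

theorem levelCorr (s : Int) : ∀ (fr : List Int) (q : List (Int × Int)) (acc : List Int)
    (vA vB : Array Bool), vA.size = 1000001 → vB.size = 100001 → Agree vA vB →
    ∃ X : List Int,
      (expandA s (q, vA) fr).1 = q ++ X.map (fun x => (x, s + 1)) ∧
      (expandB (vB, acc) fr).2 = acc ++ X ∧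
      Agree (expandA s (q, vA) fr).2 (expandB (vB, acc) fr).1 ∧
      (expandA s (q, vA) fr).2.size = 1000001 ∧ (expandB (vB, acc) fr).1.size = 100001 ∧
      cntF (expandA s (q, vA) fr).2 + X.length ≤ cntF vA := by
  intro fr
  induction fr with
  | nil =>
    intro q acc vA vB hA hB hag
    exact ⟨[], by simp [expandA], by simp [expandB], hag, hA, hB, by simp [expandA]⟩
  | cons n fr ih =>
    intro q acc vA vB hA hB hag
    obtain ⟨X1, e1, e2, hag1, hA1, hB1, hc1⟩ :=
      foldCorr s [n + 3, n - 1, n * 2] q acc vA vB hA hB hag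
    rcases hPA : [n + 3, n - 1, n * 2].foldl (pushA s) (q, vA) with ⟨qA, wA⟩
    rcases hPB : [n + 3, n - 1, n * 2].foldl pushB (vB, acc) with ⟨wB, accB⟩
    rw [hPA] at e1 hag1 hA1 hc1
    rw [hPB] at e2 hag1 hB1
    dsimp only at e1 e2 hag1 hA1 hB1 hc1
    obtain ⟨X2, f1, f2, hag2, hA2, hB2, hc2⟩ := ih qA accB wA wB hA1 hB1 hag1
    have hAstep : expandA s (q, vA) (n :: fr) = expandA s (qA, wA) fr := by
      show expandA s ([n + 3, n - 1, n * 2].foldl (pushA s) (q, vA)) fr = _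
      rw [hPA]
    have hBstep : expandB (vB, acc) (n :: fr) = expandB (wB, accB) fr := by
      show expandB ([n + 3, n - 1, n * 2].foldl pushB (vB, acc)) fr = _
      rw [hPB]
    refine ⟨X1 ++ X2, ?_, ?_, ?_, ?_, ?_, ?_⟩
    · rw [hAstep, f1, e1]; simp
    · rw [hBstep, f2, e2]; simp
    · rw [hAstep, hBstep]; exact hag2
    · rw [hAstep]; exact hA2
    · rw [hBstep]; exact hB2
    · rw [hAstep]; simp only [List.length_append]; omega

theorem loopA_nil (target : Int) (v : Array Bool) (hv : v.size = 1000001) :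
    loopA target [] v hv = none := by
  rw [loopA]

theorem loopA_cons (target now steps : Int) (rest : List (Int × Int)) (v : Array Bool)
    (hv : v.size = 1000001)
    (hv' : ([now + 3, now - 1, now * 2].foldl (pushA steps) (rest, v)).2.size = 1000001) :
    loopA target ((now, steps) :: rest) v hv =
      if now = target then some steps
      else loopA target ([now + 3, now - 1, now * 2].foldl (pushA steps) (rest, v)).1
        ([now + 3, now - 1, now * 2].foldl (pushA steps) (rest, v)).2 hv' := by
  rw [loopA]

theorem loopB_nil (target : Int) (v : Array Bool) (s : Int) (hv : v.size = 100001) :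
    loopB target [] v s hv = none := by
  rw [loopB]

theorem loopB_cons (target f : Int) (fs : List Int) (v : Array Bool) (s : Int)
    (hv : v.size = 100001) (hv' : (expandB (v, []) (f :: fs)).1.size = 100001) :
    loopB target (f :: fs) v s hv =
      if target ∈ f :: fs then some s
      else loopB target (expandB (v, []) (f :: fs)).2 (expandB (v, []) (f :: fs)).1 (s + 1) hv' := by
  rw [loopB]

theorem loopA_congr (target : Int) (p1 p2 : List (Int × Int) × Array Bool) (h : p1 = p2)
    (h1 : p1.2.size = 1000001) (h2 : p2.2.size = 1000001) :
    loopA target p1.1 p1.2 h1 = loopA target p2.1 p2.2 h2 := by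
  subst h; rfl

theorem loopB_congr (target : Int) (p1 p2 : Array Bool × List Int) (s : Int) (h : p1 = p2)
    (h1 : p1.1.size = 100001) (h2 : p2.1.size = 100001) :
    loopB target p1.2 p1.1 s h1 = loopB target p2.2 p2.1 s h2 := by
  subst h; rfl

theorem loopA_level (target s : Int) : ∀ (fr : List Int) (q : List (Int × Int)) (v : Array Bool)
    (hv : v.size = 1000001) (hv' : (expandA s (q, v) fr).2.size = 1000001),
    loopA target (fr.map (fun n => (n, s)) ++ q) v hv =
      if target ∈ fr then some s
      else loopA target (expandA s (q, v) fr).1 (expandA s (q, v) fr).2 hv' := by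
  intro fr
  induction fr with
  | nil =>
    intro q v hv hv'
    simp only [List.map_nil, List.nil_append, List.not_mem_nil, if_false]
    exact loopA_congr target (q, v) _ rfl hv hv'
  | cons n fr ih =>
    intro q v hv hv'
    have hsz : ([n + 3, n - 1, n * 2].foldl (pushA s) (q, v)).2.size = 1000001 := by
      rw [foldPushA_size]; exact hv
    have hsz2 : ([n + 3, n - 1, n * 2].foldl (pushA s)
        (fr.map (fun n => (n, s)) ++ q, v)).2.size = 1000001 := by
      rw [foldPushA_size]; exact hv
    have hshift := foldPushA_shift s [n + 3, n - 1, n * 2] (fr.map (fun n => (n, s))) q v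
    rw [show ((n :: fr).map (fun n => (n, s)) ++ q) = (n, s) :: (fr.map (fun n => (n, s)) ++ q)
      from rfl]
    rw [loopA_cons target n s (fr.map (fun n => (n, s)) ++ q) v hv hsz2]
    by_cases hnt : n = target
    · rw [if_pos hnt, if_pos (by simp [hnt.symm])]
    · rw [if_neg hnt]
      have step1 : loopA target
          ([n + 3, n - 1, n * 2].foldl (pushA s) (fr.map (fun n => (n, s)) ++ q, v)).1
          ([n + 3, n - 1, n * 2].foldl (pushA s) (fr.map (fun n => (n, s)) ++ q, v)).2 hsz2 =
          loopA target
            (fr.map (fun n => (n, s)) ++ ([n + 3, n - 1, n * 2].foldl (pushA s) (q, v)).1)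
            ([n + 3, n - 1, n * 2].foldl (pushA s) (q, v)).2
            hsz :=
        loopA_congr target _ _ hshift _ _
      rw [step1]
      rw [ih ([n + 3, n - 1, n * 2].foldl (pushA s) (q, v)).1
        ([n + 3, n - 1, n * 2].foldl (pushA s) (q, v)).2 hsz hv']
      by_cases hm : target ∈ fr
      · rw [if_pos hm, if_pos (show target ∈ n :: fr by simp [hm])]
      · rw [if_neg hm, if_neg (show target ∉ n :: fr by
          simp only [List.mem_cons, not_or]; exact ⟨fun h => hnt h.symm, hm⟩)]
        rfl

theorem mainCorr (target : Int) : ∀ (N : Nat) (fr : List Int) (vA vB : Array Bool) (s : Int)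
    (hA : vA.size = 1000001) (hB : vB.size = 100001), cntF vA ≤ N → Agree vA vB →
    loopA target (fr.map (fun n => (n, s))) vA hA = loopB target fr vB s hB := by
  intro N
  induction N with
  | zero =>
    intro fr vA vB s hA hB hcnt hag
    cases fr with
    | nil => rw [List.map_nil, loopA_nil, loopB_nil]
    | cons f fs =>
      obtain ⟨X, e1, e2, hag', hA', hB', hc⟩ := levelCorr s (f :: fs) [] [] vA vB hA hB hag
      have hlev := loopA_level target s (f :: fs) [] vA (by simpa using hA) hA'
      rw [List.append_nil] at hlev
      rw [hlev, loopB_cons target f fs vB s hB hB']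
      by_cases hm : target ∈ f :: fs
      · rw [if_pos hm, if_pos hm]
      · rw [if_neg hm, if_neg hm]
        have hX : X = [] := by
          cases X with
          | nil => rfl
          | cons x xs => exfalso; simp at hc; omega
        subst hX
        have e1' : (expandA s ([], vA) (f :: fs)).1 = [] := by simpa using e1
        have e2' : (expandB (vB, []) (f :: fs)).2 = [] := by simpa using e2
        calc loopA target (expandA s ([], vA) (f :: fs)).1 (expandA s ([], vA) (f :: fs)).2 hA'
            = loopA target (([] : List (Int × Int)), (expandA s ([], vA) (f :: fs)).2).1
                (([] : List (Int × Int)), (expandA s ([], vA) (f :: fs)).2).2 hA' :=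
              loopA_congr target (expandA s ([], vA) (f :: fs))
                (([] : List (Int × Int)), (expandA s ([], vA) (f :: fs)).2)
                (Prod.ext_iff.mpr ⟨e1', rfl⟩) hA' hA'
          _ = none := loopA_nil _ _ _
          _ = loopB target ((expandB (vB, []) (f :: fs)).1, ([] : List Int)).2
                ((expandB (vB, []) (f :: fs)).1, ([] : List Int)).1 (s + 1) hB' :=
              (loopB_nil _ _ _ _).symm
          _ = loopB target (expandB (vB, []) (f :: fs)).2 (expandB (vB, []) (f :: fs)).1
                (s + 1) hB' :=
              loopB_congr target ((expandB (vB, []) (f :: fs)).1, ([] : List Int))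
                (expandB (vB, []) (f :: fs)) (s + 1)
                (Prod.ext_iff.mpr ⟨rfl, e2'.symm⟩) hB' hB' 
  | succ N ihN =>
    intro fr vA vB s hA hB hcnt hag
    cases fr with
    | nil => rw [List.map_nil, loopA_nil, loopB_nil]
    | cons f fs =>
      obtain ⟨X, e1, e2, hag', hA', hB', hc⟩ := levelCorr s (f :: fs) [] [] vA vB hA hB hag
      have hlev := loopA_level target s (f :: fs) [] vA (by simpa using hA) hA'
      rw [List.append_nil] at hlev
      rw [hlev, loopB_cons target f fs vB s hB hB']
      by_cases hm : target ∈ f :: fs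
      · rw [if_pos hm, if_pos hm]
      · rw [if_neg hm, if_neg hm]
        have e1' : (expandA s ([], vA) (f :: fs)).1 = X.map (fun x => (x, s + 1)) := by
          simpa using e1
        have e2' : (expandB (vB, []) (f :: fs)).2 = X := by simpa using e2
        have stepA : loopA target (expandA s ([], vA) (f :: fs)).1
            (expandA s ([], vA) (f :: fs)).2 hA' =
            loopA target (X.map (fun x => (x, s + 1)), (expandA s ([], vA) (f :: fs)).2).1
              (X.map (fun x => (x, s + 1)), (expandA s ([], vA) (f :: fs)).2).2 hA' :=
          loopA_congr target (expandA s ([], vA) (f :: fs))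
            (X.map (fun x => (x, s + 1)), (expandA s ([], vA) (f :: fs)).2)
            (Prod.ext_iff.mpr ⟨e1', rfl⟩) hA' hA' 
        have stepB : loopB target (expandB (vB, []) (f :: fs)).2 (expandB (vB, []) (f :: fs)).1
            (s + 1) hB' =
            loopB target ((expandB (vB, []) (f :: fs)).1, X).2
              ((expandB (vB, []) (f :: fs)).1, X).1 (s + 1) hB' :=
          loopB_congr target (expandB (vB, []) (f :: fs)) ((expandB (vB, []) (f :: fs)).1, X)
            (s + 1) (Prod.ext_iff.mpr ⟨rfl, e2'⟩) hB' hB' 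
        rw [stepA, stepB]
        cases X with
        | nil => exact (loopA_nil _ _ _).trans (loopB_nil _ _ _ _).symm
        | cons x xs =>
          exact ihN (x :: xs) _ _ (s + 1) hA' hB' (by simp at hc; omega) hag'

-- visited tables built by BFS and BFS_alt before the loop starts
theorem getD_replicate_false (n j : Nat) : (Array.replicate n false).getD j false = false := by
  simp [Array.getD]

theorem agree_init (start : Int) (hs : -3 ≤ start) (hs' : start ≤ 1000000) :
    Agree (pySetVis (Array.replicate 1000001 false) start)
      (if 0 ≤ start ∧ start ≤ 100000 then
        (Array.replicate 100001 false).setIfInBounds start.toNat true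
      else Array.replicate 100001 false) := by
  intro j hj
  by_cases h0 : 0 ≤ start ∧ start ≤ 100000
  · rw [if_pos h0]
    unfold pySetVis
    rw [if_neg (by omega)]
    rw [getD_setIfInBounds_true _ _ _ (by simp; omega),
        getD_setIfInBounds_true _ _ _ (by simp; omega)]
    rw [getD_replicate_false, getD_replicate_false]
  · rw [if_neg h0]
    unfold pySetVis
    by_cases hneg : start < 0
    · rw [if_pos hneg]
      rw [getD_setIfInBounds_true _ _ _ (by simp; omega)]
      rw [if_neg (by simp; omega)]
      rw [getD_replicate_false, getD_replicate_false]
    · rw [if_neg hneg]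
      rw [getD_setIfInBounds_true _ _ _ (by simp; omega)]
      rw [if_neg (by omega)]
      rw [getD_replicate_false, getD_replicate_false]

-- ===== VERDICT (by name: the statement is the Claim_ definition above) =====
set_option maxRecDepth 8192 in
theorem BFS_spec : Claim_equal_BFS := by
  unfold Claim_equal_BFS Spec_BFS Pre_BFS
  intro start target _ hpre
  unfold BFS BFS_alt
  by_cases hs : -3 ≤ start
  · exact mainCorr target (cntF (pySetVis (Array.replicate 1000001 false) start)) [start] _ _ 0
      _ _ le_rfl (agree_init start hs hpre.2)
  · -- start ≤ -4: the queue dies after the first pop on both sides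
    have h1 : ∀ (q : List (Int × Int)) (v : Array Bool) (i : Int), i < 0 →
        pushA 0 (q, v) i = (q, v) := by
      intro q v i hi; unfold pushA; rw [if_neg (by omega)]
    have h2 : ∀ (v : Array Bool) (acc : List Int) (i : Int), i < 0 →
        pushB (v, acc) i = (v, acc) := by
      intro v acc i hi; unfold pushB; rw [if_neg (by omega)]
    have hA0 : (pySetVis (Array.replicate 1000001 false) start).size = 1000001 := by
      unfold pySetVis; split <;> simp
    have hfold : [start + 3, start - 1, start * 2].foldl (pushA 0)
        (([] : List (Int × Int)), pySetVis (Array.replicate 1000001 false) start) =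
        ([], pySetVis (Array.replicate 1000001 false) start) := by
      simp only [List.foldl_cons, List.foldl_nil]
      rw [h1 _ _ _ (by omega), h1 _ _ _ (by omega), h1 _ _ _ (by omega)]
    have hexpB : ∀ v : Array Bool, expandB (v, []) [start] = (v, []) := by
      intro v
      show [start + 3, start - 1, start * 2].foldl pushB (v, []) = (v, [])
      simp only [List.foldl_cons, List.foldl_nil]
      rw [h2 _ _ _ (by omega), h2 _ _ _ (by omega), h2 _ _ _ (by omega)]
    rw [loopA_cons target start 0 [] _ hA0 (by rw [foldPushA_size]; exact hA0)]
    rw [loopB_cons target start [] _ 0 (by split <;> simp)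
      (by rw [expandB_size]; split <;> simp)]
    by_cases ht : start = target
    · simp only [if_pos ht, if_pos (show target ∈ [start] by simp [ht.symm])]
    · simp only [if_neg ht, if_neg (show target ∉ [start] by simp; exact fun h => ht h.symm)]
      have stepA := loopA_congr target
        ([start + 3, start - 1, start * 2].foldl (pushA 0)
          (([] : List (Int × Int)), pySetVis (Array.replicate 1000001 false) start))
        ([], pySetVis (Array.replicate 1000001 false) start) hfold
        (by rw [foldPushA_size]; exact hA0) hA0
      have hB0 : (if 0 ≤ start ∧ start ≤ 100000 then
          (Array.replicate 100001 false).setIfInBounds start.toNat true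
        else Array.replicate 100001 false).size = 100001 := by split <;> simp
      have stepB := loopB_congr target
        (expandB ((if 0 ≤ start ∧ start ≤ 100000 then
            (Array.replicate 100001 false).setIfInBounds start.toNat true
          else Array.replicate 100001 false), []) [start])
        ((if 0 ≤ start ∧ start ≤ 100000 then
            (Array.replicate 100001 false).setIfInBounds start.toNat true
          else Array.replicate 100001 false), ([] : List Int)) (0 + 1)
        (hexpB _) (by rw [expandB_size]; exact hB0) hB0
      exact (stepA.trans (loopA_nil target _ hA0)).trans
        ((stepB.trans (loopB_nil target _ (0 + 1) hB0)).symm)
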